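-- pv_equiv track=rewrite | github.com/damsa34/Project-Euler-Problems | Problem42.py | getNameValue
-- ===== SOURCE A (Python) =====
-- def getNameValue(name):
--     letters = {'A' : 1, 'B' : 2, 'C' : 3, 'D' : 4, 'E' : 5, 'F' : 6, 'G' : 7,
--                'H' : 8, 'I' : 9, 'J' : 10, 'K' : 11, 'L' : 12, 'M' : 13, 'N' : 14,
--                'O' : 15, 'P' : 16, 'Q' : 17, 'R' : 18, 'S' : 19, 'T' : 20, 'U' : 21,
--                'V' : 22, 'W' : 23, 'X' : 24, 'Y' : 25, 'Z' : 26}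
--     name = name.upper()
--     nameValue = sum(letters[letter] for letter in name if letter in letters)
--     return nameValue
-- ===== SOURCE B (Python) =====
-- ALPHABET = 'ABCDEFGHIJKLMNOPQRSTUVWXYZ'
--
-- def getNameValue(name):
--     # Histogram algorithm: build a character-frequency table of the uppercased
--     # name in one pass, then scan the fixed 26-letter alphabet, weighting each
--     # letter's count by its alphabetical position.
--     counts = {}
--     for ch in name.upper():
--         counts[ch] = counts.get(ch, 0) + 1
--     return sum(i * counts.get(ch, 0) for i, ch in enumerate(ALPHABET, 1))
-- ===== Notes on version B (the rewrite author's own statement) =====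
-- stated objective: alternative
-- what changed: Replaces A's per-character dict-lookup summation with a histogram algorithm: one pass builds a character-frequency table of the uppercased name, then a scan over the fixed 26-letter alphabet sums position * count, so non-letters are ignored by never being consulted rather than filtered per character.
import Mathlib
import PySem

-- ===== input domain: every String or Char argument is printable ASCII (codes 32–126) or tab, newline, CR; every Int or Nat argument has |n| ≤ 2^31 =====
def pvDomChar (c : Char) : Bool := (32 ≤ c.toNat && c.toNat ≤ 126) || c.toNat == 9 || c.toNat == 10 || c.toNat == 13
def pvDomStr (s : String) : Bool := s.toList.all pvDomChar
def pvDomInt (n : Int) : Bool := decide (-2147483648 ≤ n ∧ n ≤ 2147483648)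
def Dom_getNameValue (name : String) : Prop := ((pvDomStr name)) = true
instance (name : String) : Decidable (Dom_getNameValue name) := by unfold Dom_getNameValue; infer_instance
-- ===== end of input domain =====

-- B replaces A's per-character dict-lookup sum with a histogram algorithm:
-- one pass builds a frequency table of the uppercased name, then a scan over the
-- fixed 26-letter alphabet sums position * count (alternative; same values).

-- ===== PORT A =====
-- the literal 26-entry dict A builds on every call
def pvLetters : PySem.Dict Char Int := PySem.Dict.ofList
  [('A', 1), ('B', 2), ('C', 3), ('D', 4), ('E', 5), ('F', 6), ('G', 7),
   ('H', 8), ('I', 9), ('J', 10), ('K', 11), ('L', 12), ('M', 13), ('N', 14),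
   ('O', 15), ('P', 16), ('Q', 17), ('R', 18), ('S', 19), ('T', 20), ('U', 21),
   ('V', 22), ('W', 23), ('X', 24), ('Y', 25), ('Z', 26)]

def getNameValue (name : String) : Int :=
  let letters := pvLetters
  let name' := PySem.Str.upper name
  -- sum(letters[letter] for letter in name if letter in letters)
  name'.toList.foldl (fun acc letter =>
    if letters.contains letter then acc + letters.getD letter 0 else acc) 0

-- ===== PORT B =====
def pvAlphabet : String := "ABCDEFGHIJKLMNOPQRSTUVWXYZ"

-- sum(i * counts.get(ch, 0) for i, ch in enumerate(ALPHABET, 1))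
def pvWeightedAlphabetSum (counts : PySem.Dict Char Int) : Int :=
  (PySem.List.enumerate pvAlphabet.toList 1).foldl
    (fun acc p => acc + p.1 * counts.getD p.2 0) 0

def getNameValue_alt (name : String) : Int :=
  -- counts = {}; for ch in name.upper(): counts[ch] = counts.get(ch, 0) + 1
  let counts : PySem.Dict Char Int :=
    (PySem.Str.upper name).toList.foldl
      (fun d ch => d.insert ch (d.getD ch 0 + 1)) PySem.Dict.empty
  pvWeightedAlphabetSum counts

-- ===== PRECONDITION & SPEC =====
def Spec_getNameValue (name : String) (out : Int) : Prop := out = getNameValue_alt name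
instance (name : String) (out : Int) : Decidable (Spec_getNameValue name out) := by unfold Spec_getNameValue; infer_instance

-- ===== CLAIM (what is proved, stated in full; the proofs are below) =====
def Claim_equal_getNameValue : Prop := ∀ (name : String), Dom_getNameValue name → Spec_getNameValue name (getNameValue name)

-- ===== LEMMAS AND PROOFS =====

-- the common per-character value: position in the alphabet for A–Z, 0 otherwise
def pvG (c : Char) : Int := if 'A' ≤ c ∧ c ≤ 'Z' then ((c.toNat : Int) - 64) else 0

theorem char_eq_of_toNat (c d : Char) (h : c.toNat = d.toNat) : c = d := by
  apply Char.ext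
  apply UInt32.toNat_inj.mp
  exact h

theorem pv_contains_false (c : Char) (h' : ¬ (65 ≤ c.toNat ∧ c.toNat ≤ 90)) :
    pvLetters.contains c = false := by
  have hd : pvLetters = PySem.Dict.mk
    [('A', 1), ('B', 2), ('C', 3), ('D', 4), ('E', 5), ('F', 6), ('G', 7),
     ('H', 8), ('I', 9), ('J', 10), ('K', 11), ('L', 12), ('M', 13), ('N', 14),
     ('O', 15), ('P', 16), ('Q', 17), ('R', 18), ('S', 19), ('T', 20), ('U', 21),
     ('V', 22), ('W', 23), ('X', 24), ('Y', 25), ('Z', 26)] := by rfl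
  simp only [hd, PySem.Dict.contains_mk]
  norm_num
  and_intros <;> (intro he; subst he; exact h' (by decide))

theorem pv_in (c : Char) (h1 : 'A' ≤ c) (h2 : c ≤ 'Z') :
    pvLetters.contains c = true ∧ pvLetters.getD c 0 = ((c.toNat : Int) - 64) := by
  have hlo : 65 ≤ c.toNat := by
    simpa [Char.le_def, UInt32.le_iff_toNat_le] using h1
  have hhi : c.toNat ≤ 90 := by
    simpa [Char.le_def, UInt32.le_iff_toNat_le] using h2
  by_cases hA : c = 'A'; · subst hA; decide
  by_cases hB : c = 'B'; · subst hB; decide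
  by_cases hC : c = 'C'; · subst hC; decide
  by_cases hD : c = 'D'; · subst hD; decide
  by_cases hE : c = 'E'; · subst hE; decide
  by_cases hF : c = 'F'; · subst hF; decide
  by_cases hG : c = 'G'; · subst hG; decide
  by_cases hH : c = 'H'; · subst hH; decide
  by_cases hI : c = 'I'; · subst hI; decide
  by_cases hJ : c = 'J'; · subst hJ; decide
  by_cases hK : c = 'K'; · subst hK; decide
  by_cases hL : c = 'L'; · subst hL; decide
  by_cases hM : c = 'M'; · subst hM; decide
  by_cases hN : c = 'N'; · subst hN; decide
  by_cases hO : c = 'O'; · subst hO; decide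
  by_cases hP : c = 'P'; · subst hP; decide
  by_cases hQ : c = 'Q'; · subst hQ; decide
  by_cases hR : c = 'R'; · subst hR; decide
  by_cases hS : c = 'S'; · subst hS; decide
  by_cases hT : c = 'T'; · subst hT; decide
  by_cases hU : c = 'U'; · subst hU; decide
  by_cases hV : c = 'V'; · subst hV; decide
  by_cases hW : c = 'W'; · subst hW; decide
  by_cases hX : c = 'X'; · subst hX; decide
  by_cases hY : c = 'Y'; · subst hY; decide
  by_cases hZ : c = 'Z'; · subst hZ; decide
  exfalso
  have n65 : c.toNat ≠ 65 := fun he => hA (char_eq_of_toNat c 'A' (by simp [he]))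
  have n66 : c.toNat ≠ 66 := fun he => hB (char_eq_of_toNat c 'B' (by simp [he]))
  have n67 : c.toNat ≠ 67 := fun he => hC (char_eq_of_toNat c 'C' (by simp [he]))
  have n68 : c.toNat ≠ 68 := fun he => hD (char_eq_of_toNat c 'D' (by simp [he]))
  have n69 : c.toNat ≠ 69 := fun he => hE (char_eq_of_toNat c 'E' (by simp [he]))
  have n70 : c.toNat ≠ 70 := fun he => hF (char_eq_of_toNat c 'F' (by simp [he]))
  have n71 : c.toNat ≠ 71 := fun he => hG (char_eq_of_toNat c 'G' (by simp [he]))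
  have n72 : c.toNat ≠ 72 := fun he => hH (char_eq_of_toNat c 'H' (by simp [he]))
  have n73 : c.toNat ≠ 73 := fun he => hI (char_eq_of_toNat c 'I' (by simp [he]))
  have n74 : c.toNat ≠ 74 := fun he => hJ (char_eq_of_toNat c 'J' (by simp [he]))
  have n75 : c.toNat ≠ 75 := fun he => hK (char_eq_of_toNat c 'K' (by simp [he]))
  have n76 : c.toNat ≠ 76 := fun he => hL (char_eq_of_toNat c 'L' (by simp [he]))
  have n77 : c.toNat ≠ 77 := fun he => hM (char_eq_of_toNat c 'M' (by simp [he]))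
  have n78 : c.toNat ≠ 78 := fun he => hN (char_eq_of_toNat c 'N' (by simp [he]))
  have n79 : c.toNat ≠ 79 := fun he => hO (char_eq_of_toNat c 'O' (by simp [he]))
  have n80 : c.toNat ≠ 80 := fun he => hP (char_eq_of_toNat c 'P' (by simp [he]))
  have n81 : c.toNat ≠ 81 := fun he => hQ (char_eq_of_toNat c 'Q' (by simp [he]))
  have n82 : c.toNat ≠ 82 := fun he => hR (char_eq_of_toNat c 'R' (by simp [he]))
  have n83 : c.toNat ≠ 83 := fun he => hS (char_eq_of_toNat c 'S' (by simp [he]))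
  have n84 : c.toNat ≠ 84 := fun he => hT (char_eq_of_toNat c 'T' (by simp [he]))
  have n85 : c.toNat ≠ 85 := fun he => hU (char_eq_of_toNat c 'U' (by simp [he]))
  have n86 : c.toNat ≠ 86 := fun he => hV (char_eq_of_toNat c 'V' (by simp [he]))
  have n87 : c.toNat ≠ 87 := fun he => hW (char_eq_of_toNat c 'W' (by simp [he]))
  have n88 : c.toNat ≠ 88 := fun he => hX (char_eq_of_toNat c 'X' (by simp [he]))
  have n89 : c.toNat ≠ 89 := fun he => hY (char_eq_of_toNat c 'Y' (by simp [he]))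
  have n90 : c.toNat ≠ 90 := fun he => hZ (char_eq_of_toNat c 'Z' (by simp [he]))
  omega

-- A's loop body equals "add pvG"
theorem pv_step_eq (acc : Int) (c : Char) :
    (if pvLetters.contains c then acc + pvLetters.getD c 0 else acc) = acc + pvG c := by
  unfold pvG
  by_cases h : 'A' ≤ c ∧ c ≤ 'Z'
  · obtain ⟨hcon, hval⟩ := pv_in c h.1 h.2
    simp [h, hcon, hval]
  · have h' : ¬ (65 ≤ c.toNat ∧ c.toNat ≤ 90) := by
      intro hc
      refine h ⟨?_, ?_⟩
      · simpa [Char.le_def, UInt32.le_iff_toNat_le] using hc.1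
      · simpa [Char.le_def, UInt32.le_iff_toNat_le] using hc.2
    simp [h, pv_contains_false c h']

-- A = Σ pvG over the uppercased characters
theorem pvA_eq_sum (name : String) :
    getNameValue name = (((PySem.Str.upper name).toList.map pvG).sum) := by
  show (PySem.Str.upper name).toList.foldl (fun acc letter =>
      if pvLetters.contains letter then acc + pvLetters.getD letter 0 else acc) 0
    = (((PySem.Str.upper name).toList.map pvG).sum)
  have h1 : (PySem.Str.upper name).toList.foldl (fun acc letter =>
      if pvLetters.contains letter then acc + pvLetters.getD letter 0 else acc) 0
    = (PySem.Str.upper name).toList.foldl (fun acc c => acc + pvG c) 0 :=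
    PySem.List.foldl_congr_mem _ _ _ _ (fun acc x _ => pv_step_eq acc x)
  rw [h1, PySem.List.foldl_add]
  simp

-- picking one character out of the weighted alphabet sum
theorem pv_pick (c : Char) :
    ((PySem.List.enumerate pvAlphabet.toList 1).map
      (fun p => p.1 * (if p.2 == c then (1 : Int) else 0))).sum = pvG c := by
  have he : PySem.List.enumerate pvAlphabet.toList 1 =
    [(1,'A'),(2,'B'),(3,'C'),(4,'D'),(5,'E'),(6,'F'),(7,'G'),(8,'H'),(9,'I'),(10,'J'),
     (11,'K'),(12,'L'),(13,'M'),(14,'N'),(15,'O'),(16,'P'),(17,'Q'),(18,'R'),(19,'S'),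
     (20,'T'),(21,'U'),(22,'V'),(23,'W'),(24,'X'),(25,'Y'),(26,'Z')] := by decide
  rw [he]
  unfold pvG
  by_cases hA : c = 'A'; · subst hA; decide
  by_cases hB : c = 'B'; · subst hB; decide
  by_cases hC : c = 'C'; · subst hC; decide
  by_cases hD : c = 'D'; · subst hD; decide
  by_cases hE : c = 'E'; · subst hE; decide
  by_cases hF : c = 'F'; · subst hF; decide
  by_cases hG : c = 'G'; · subst hG; decide
  by_cases hH : c = 'H'; · subst hH; decide
  by_cases hI : c = 'I'; · subst hI; decide
  by_cases hJ : c = 'J'; · subst hJ; decide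
  by_cases hK : c = 'K'; · subst hK; decide
  by_cases hL : c = 'L'; · subst hL; decide
  by_cases hM : c = 'M'; · subst hM; decide
  by_cases hN : c = 'N'; · subst hN; decide
  by_cases hO : c = 'O'; · subst hO; decide
  by_cases hP : c = 'P'; · subst hP; decide
  by_cases hQ : c = 'Q'; · subst hQ; decide
  by_cases hR : c = 'R'; · subst hR; decide
  by_cases hS : c = 'S'; · subst hS; decide
  by_cases hT : c = 'T'; · subst hT; decide
  by_cases hU : c = 'U'; · subst hU; decide
  by_cases hV : c = 'V'; · subst hV; decide
  by_cases hW : c = 'W'; · subst hW; decide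
  by_cases hX : c = 'X'; · subst hX; decide
  by_cases hY : c = 'Y'; · subst hY; decide
  by_cases hZ : c = 'Z'; · subst hZ; decide
  have hni : ¬ ('A' ≤ c ∧ c ≤ 'Z') := by
    intro hc
    have hlo : 65 ≤ c.toNat := by
      simpa [Char.le_def, UInt32.le_iff_toNat_le] using hc.1
    have hhi : c.toNat ≤ 90 := by
      simpa [Char.le_def, UInt32.le_iff_toNat_le] using hc.2
    have n65 : c.toNat ≠ 65 := fun he => hA (char_eq_of_toNat c 'A' (by simp [he]))
    have n66 : c.toNat ≠ 66 := fun he => hB (char_eq_of_toNat c 'B' (by simp [he]))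
    have n67 : c.toNat ≠ 67 := fun he => hC (char_eq_of_toNat c 'C' (by simp [he]))
    have n68 : c.toNat ≠ 68 := fun he => hD (char_eq_of_toNat c 'D' (by simp [he]))
    have n69 : c.toNat ≠ 69 := fun he => hE (char_eq_of_toNat c 'E' (by simp [he]))
    have n70 : c.toNat ≠ 70 := fun he => hF (char_eq_of_toNat c 'F' (by simp [he]))
    have n71 : c.toNat ≠ 71 := fun he => hG (char_eq_of_toNat c 'G' (by simp [he]))
    have n72 : c.toNat ≠ 72 := fun he => hH (char_eq_of_toNat c 'H' (by simp [he]))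
    have n73 : c.toNat ≠ 73 := fun he => hI (char_eq_of_toNat c 'I' (by simp [he]))
    have n74 : c.toNat ≠ 74 := fun he => hJ (char_eq_of_toNat c 'J' (by simp [he]))
    have n75 : c.toNat ≠ 75 := fun he => hK (char_eq_of_toNat c 'K' (by simp [he]))
    have n76 : c.toNat ≠ 76 := fun he => hL (char_eq_of_toNat c 'L' (by simp [he]))
    have n77 : c.toNat ≠ 77 := fun he => hM (char_eq_of_toNat c 'M' (by simp [he]))
    have n78 : c.toNat ≠ 78 := fun he => hN (char_eq_of_toNat c 'N' (by simp [he]))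
    have n79 : c.toNat ≠ 79 := fun he => hO (char_eq_of_toNat c 'O' (by simp [he]))
    have n80 : c.toNat ≠ 80 := fun he => hP (char_eq_of_toNat c 'P' (by simp [he]))
    have n81 : c.toNat ≠ 81 := fun he => hQ (char_eq_of_toNat c 'Q' (by simp [he]))
    have n82 : c.toNat ≠ 82 := fun he => hR (char_eq_of_toNat c 'R' (by simp [he]))
    have n83 : c.toNat ≠ 83 := fun he => hS (char_eq_of_toNat c 'S' (by simp [he]))
    have n84 : c.toNat ≠ 84 := fun he => hT (char_eq_of_toNat c 'T' (by simp [he]))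
    have n85 : c.toNat ≠ 85 := fun he => hU (char_eq_of_toNat c 'U' (by simp [he]))
    have n86 : c.toNat ≠ 86 := fun he => hV (char_eq_of_toNat c 'V' (by simp [he]))
    have n87 : c.toNat ≠ 87 := fun he => hW (char_eq_of_toNat c 'W' (by simp [he]))
    have n88 : c.toNat ≠ 88 := fun he => hX (char_eq_of_toNat c 'X' (by simp [he]))
    have n89 : c.toNat ≠ 89 := fun he => hY (char_eq_of_toNat c 'Y' (by simp [he]))
    have n90 : c.toNat ≠ 90 := fun he => hZ (char_eq_of_toNat c 'Z' (by simp [he]))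
    omega
  have hb : ∀ d : Char, d ≠ c → (d == c) = false := by
    intro d hd; exact beq_eq_false_iff_ne.mpr hd
  simp only [List.map_cons, List.map_nil, List.sum_cons, List.sum_nil,
    hb 'A' (fun h => hA h.symm), hb 'B' (fun h => hB h.symm), hb 'C' (fun h => hC h.symm),
    hb 'D' (fun h => hD h.symm), hb 'E' (fun h => hE h.symm), hb 'F' (fun h => hF h.symm),
    hb 'G' (fun h => hG h.symm), hb 'H' (fun h => hH h.symm), hb 'I' (fun h => hI h.symm),
    hb 'J' (fun h => hJ h.symm), hb 'K' (fun h => hK h.symm), hb 'L' (fun h => hL h.symm),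
    hb 'M' (fun h => hM h.symm), hb 'N' (fun h => hN h.symm), hb 'O' (fun h => hO h.symm),
    hb 'P' (fun h => hP h.symm), hb 'Q' (fun h => hQ h.symm), hb 'R' (fun h => hR h.symm),
    hb 'S' (fun h => hS h.symm), hb 'T' (fun h => hT h.symm), hb 'U' (fun h => hU h.symm),
    hb 'V' (fun h => hV h.symm), hb 'W' (fun h => hW h.symm), hb 'X' (fun h => hX h.symm),
    hb 'Y' (fun h => hY h.symm), hb 'Z' (fun h => hZ h.symm), if_neg hni]
  norm_num

-- the weighted count-sum over the alphabet equals Σ pvG over the string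
theorem pv_sum_count (l : List Char) :
    ((PySem.List.enumerate pvAlphabet.toList 1).map
      (fun p => p.1 * (l.count p.2 : Int))).sum = (l.map pvG).sum := by
  induction l with
  | nil => simp
  | cons c t ih =>
    have hsplit : ∀ p : Int × Char,
        p.1 * (((c :: t).count p.2 : Nat) : Int)
          = p.1 * (t.count p.2 : Int) + p.1 * (if p.2 == c then (1 : Int) else 0) := by
      intro p
      rw [List.count_cons]
      by_cases h : p.2 = c
      · subst h; simp; ring_nf
      · simp [beq_eq_false_iff_ne.mpr h]
        exact Or.inl (fun h' => h h'.symm)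
    calc ((PySem.List.enumerate pvAlphabet.toList 1).map
            (fun p => p.1 * ((c :: t).count p.2 : Int))).sum
        = ((PySem.List.enumerate pvAlphabet.toList 1).map
            (fun p => p.1 * (t.count p.2 : Int)
              + p.1 * (if p.2 == c then (1 : Int) else 0))).sum := by
          exact congrArg List.sum (List.map_congr_left (fun p _ => hsplit p))
      _ = ((PySem.List.enumerate pvAlphabet.toList 1).map
            (fun p => p.1 * (t.count p.2 : Int))).sum
          + ((PySem.List.enumerate pvAlphabet.toList 1).map
            (fun p => p.1 * (if p.2 == c then (1 : Int) else 0))).sum := by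
          rw [← List.sum_map_add]
      _ = (t.map pvG).sum + pvG c := by rw [ih, pv_pick]
      _ = ((c :: t).map pvG).sum := by simp [List.map_cons]; ring

-- B = Σ pvG over the uppercased characters
theorem pvB_eq_sum (name : String) :
    getNameValue_alt name = (((PySem.Str.upper name).toList.map pvG).sum) := by
  have h0 : getNameValue_alt name = pvWeightedAlphabetSum
      ((PySem.Str.upper name).toList.foldl
        (fun d ch => d.insert ch (d.getD ch 0 + 1)) PySem.Dict.empty) := rfl
  rw [h0]
  unfold pvWeightedAlphabetSum
  have hc : ∀ ch : Char, ((PySem.Str.upper name).toList.foldl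
      (fun d ch => d.insert ch (d.getD ch 0 + 1)) PySem.Dict.empty).getD ch 0
        = (((PySem.Str.upper name).toList.count ch : Nat) : Int) := by
    intro ch
    rw [PySem.Dict.getD_foldl_insert_add_one]
    simp
  have h1 : (PySem.List.enumerate pvAlphabet.toList 1).foldl
      (fun acc p => acc + p.1 *
        ((PySem.Str.upper name).toList.foldl
          (fun d ch => d.insert ch (d.getD ch 0 + 1)) PySem.Dict.empty).getD p.2 0) 0
    = (PySem.List.enumerate pvAlphabet.toList 1).foldl
      (fun acc p => acc + p.1 * (((PySem.Str.upper name).toList.count p.2 : Nat) : Int)) 0 :=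
    PySem.List.foldl_congr_mem _ _ _ _ (fun acc x _ => by rw [hc x.2])
  rw [h1, PySem.List.foldl_add, zero_add, pv_sum_count]

-- ===== VERDICT (by name: the statement is the Claim_ definition above) =====
theorem getNameValue_spec : Claim_equal_getNameValue := by
  intro name _
  unfold Spec_getNameValue
  rw [pvA_eq_sum, pvB_eq_sum]
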